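-- pv_equiv track=rewrite | github.com/CocoRoF/Contextify | libs/core/processor/pdf_handler.py | _clean_pdfplumber_table
-- ===== SOURCE A (Python) =====
-- from typing import Any, Dict, List, Optional, Tuple
--
-- def _clean_pdfplumber_table(table_data: List[List[Optional[str]]]) -> List[List[Optional[str]]]:
--     """
--     pdfplumber에서 추출한 테이블 데이터를 정제합니다.
--
--     - None 값을 빈 문자열로 변환
--     - 앞뒤 공백 제거
--     - 빈 행 제거
--     - 열 수 통일
--
--     Args:
--         table_data: pdfplumber extract_tables() 결과
--
--     Returns:
--         정제된 테이블 데이터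
--     """
--     if not table_data:
--         return []
--
--     # 열 수 통일
--     max_cols = max(len(row) for row in table_data if row) if table_data else 0
--
--     cleaned = []
--     for row in table_data:
--         cleaned_row = []
--
--         if not row:
--             # 빈 행도 유지 (물리적 셀 정보와 매핑 유지를 위해)
--             cleaned_row = [""] * max_cols
--         else:
--             for i in range(max_cols):
--                 if i < len(row):
--                     cell = row[i]
--                     if cell is None:
--                         cleaned_row.append("")
--                     else:
--                         # 줄바꿈을 공백으로 대체하고 정제
--                         cell_str = str(cell).replace('\n', ' ').strip()
--                         cleaned_row.append(cell_str)
--                 else: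
--                     cleaned_row.append("")
--
--         # 빈 행도 포함 (물리적 셀 정보와 행 인덱스 매핑을 위해)
--         cleaned.append(cleaned_row)
--
--     return cleaned
-- ===== SOURCE B (Python) =====
-- from typing import List, Optional
--
-- def _clean_pdfplumber_table(table_data: List[List[Optional[str]]]) -> List[List[Optional[str]]]:
--     if not table_data:
--         return []
--     max_cols = max(len(row) for row in table_data if row)
--
--     def clean(c):
--         return '' if c is None else str(c).replace('\n', ' ').strip()
--
--     # build the table column by column (column-major traversal) ...
--     cols = [[clean(row[j]) if j < len(row) else '' for row in table_data]
--             for j in range(max_cols)]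
--     # ... then transpose the columns back into rows
--     return [list(t) for t in zip(*cols)]
-- ===== Notes on version B (the rewrite author's own statement) =====
-- stated objective: alternative
-- what changed: B builds the cleaned table column by column (one list per column index, traversing all rows per column) and then transposes with zip(*cols), instead of A's row-wise pass with an empty-row branch and a per-cell index bounds check.
import Mathlib
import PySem

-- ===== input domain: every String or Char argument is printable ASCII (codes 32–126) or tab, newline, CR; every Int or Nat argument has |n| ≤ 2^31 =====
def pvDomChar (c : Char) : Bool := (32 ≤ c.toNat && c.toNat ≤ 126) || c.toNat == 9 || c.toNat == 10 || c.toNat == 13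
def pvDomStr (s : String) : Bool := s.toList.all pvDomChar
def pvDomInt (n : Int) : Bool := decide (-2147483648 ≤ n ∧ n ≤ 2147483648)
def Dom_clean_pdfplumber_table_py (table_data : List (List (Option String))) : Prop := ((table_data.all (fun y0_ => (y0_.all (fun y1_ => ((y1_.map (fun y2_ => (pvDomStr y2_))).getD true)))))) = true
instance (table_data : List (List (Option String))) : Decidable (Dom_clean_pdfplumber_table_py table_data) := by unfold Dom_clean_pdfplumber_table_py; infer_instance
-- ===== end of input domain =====

-- B builds the table column by column and transposes with zip(*cols), instead of A's row-wise
-- index loop with per-cell bounds check and an empty-row branch (objective: alternative).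

-- cell cleaning shared by both ports: "" for None, else str(cell).replace('\n',' ').strip()
def pvCleanCell (c : Option String) : Option String :=
  match c with
  | none => some ""
  | some s => some (PySem.Str.strip (PySem.Str.replace s "\n" " "))

-- ===== PORT A =====
def clean_pdfplumber_table_py (table_data : List (List (Option String))) : List (List (Option String)) :=
  if table_data = [] then []
  else
    -- max(len(row) for row in table_data if row); Pre_ guarantees the generator is nonempty (else Python raises ValueError)
    let maxCols : Nat :=
      ((PySem.List.max? ((table_data.filter (fun r => !r.isEmpty)).map (fun r => r.length)) (fun x => x)).getD 0)
    table_data.foldl (fun cleaned row =>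
      let cleaned_row :=
        if row = [] then List.replicate maxCols (some "")
        else (List.range maxCols).foldl (fun acc i =>
          if i < row.length then acc ++ [pvCleanCell (row.getD i none)]
          else acc ++ [some ""]) []
      cleaned ++ [cleaned_row]) []

-- ===== PORT B =====
-- zip(*cols): peel the head off every column (none when some column is exhausted)
def pvPeel {α : Type} : List (List α) → Option (List α × List (List α))
  | [] => some ([], [])
  | [] :: _ => none
  | (x :: xs) :: rest => (pvPeel rest).map (fun p => (x :: p.1, xs :: p.2))

def pvColsSize {α : Type} (cols : List (List α)) : Nat := (cols.map List.length).sum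

theorem pvPeel_size {α : Type} : ∀ (cols : List (List α)) (hs : List α) (ts : List (List α)),
    pvPeel cols = some (hs, ts) → pvColsSize cols = pvColsSize ts + cols.length := by
  intro cols
  induction cols with
  | nil => intro hs ts h; simp [pvPeel] at h; simp [h.2, pvColsSize]
  | cons c rest ih =>
    intro hs ts h
    match c with
    | [] => simp [pvPeel] at h
    | x :: xs =>
      simp only [pvPeel, Option.map_eq_some_iff] at h
      obtain ⟨⟨hs', ts'⟩, hp, heq⟩ := h
      cases heq
      have := ih hs' ts' hp
      simp [pvColsSize] at this ⊢
      omega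

-- zip over the columns: emit the heads, recurse on the tails
def pvZipStar {α : Type} (cols : List (List α)) : List (List α) :=
  if _h : cols = [] then []
  else
    match _hp : pvPeel cols with
    | none => []
    | some (hs, ts) => hs :: pvZipStar ts
termination_by pvColsSize cols
decreasing_by
  have := pvPeel_size cols hs ts _hp
  have hlen : 0 < cols.length := List.length_pos_iff.2 _h
  omega

def clean_pdfplumber_table_py_alt (table_data : List (List (Option String))) : List (List (Option String)) :=
  if table_data = [] then []
  else
    let maxCols : Nat :=
      ((PySem.List.max? ((table_data.filter (fun r => !r.isEmpty)).map (fun r => r.length)) (fun x => x)).getD 0)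
    let cols : List (List (Option String)) :=
      (List.range maxCols).map (fun j =>
        table_data.map (fun row =>
          if j < row.length then pvCleanCell (row.getD j none) else some ""))
    pvZipStar cols

-- ===== PRECONDITION & SPEC =====
-- Pre_ excludes only the inputs on which A RAISES: a nonempty table whose rows are all empty
-- makes `max(...)` receive an empty generator and raise ValueError (B raises identically there).
def Pre_clean_pdfplumber_table_py (table_data : List (List (Option String))) : Prop :=
  table_data = [] ∨ ∃ r ∈ table_data, r ≠ []
instance (table_data : List (List (Option String))) : Decidable (Pre_clean_pdfplumber_table_py table_data) := by unfold Pre_clean_pdfplumber_table_py; infer_instance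

def pvWitness_clean_pdfplumber_table_py : List (List (Option String)) := [[some " a\nb ", none], []]

def Spec_clean_pdfplumber_table_py (table_data : List (List (Option String))) (out : List (List (Option String))) : Prop := out = clean_pdfplumber_table_py_alt table_data
instance (table_data : List (List (Option String))) (out : List (List (Option String))) : Decidable (Spec_clean_pdfplumber_table_py table_data out) := by unfold Spec_clean_pdfplumber_table_py; infer_instance

-- ===== CLAIM (what is proved, stated in full; the proofs are below) =====
def Claim_equal_clean_pdfplumber_table_py : Prop := ∀ (table_data : List (List (Option String))), Dom_clean_pdfplumber_table_py table_data → Pre_clean_pdfplumber_table_py table_data → Spec_clean_pdfplumber_table_py table_data (clean_pdfplumber_table_py table_data)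

-- ===== LEMMAS AND PROOFS =====

-- a foldl that only appends one element per step is a map
theorem pv_foldl_append_map {α β : Type} (l : List α) (g : α → β) (acc : List β) :
    l.foldl (fun a x => a ++ [g x]) acc = acc ++ l.map g := by
  induction l generalizing acc with
  | nil => simp
  | cons h t ih => simp [List.foldl, ih]

-- A's inner index loop is a map over range
theorem pv_row_foldl_eq_map (row : List (Option String)) (n : Nat) :
    (List.range n).foldl (fun acc i =>
        if i < row.length then acc ++ [pvCleanCell (row.getD i none)]
        else acc ++ [some ""]) []
      = (List.range n).map (fun i =>
        if i < row.length then pvCleanCell (row.getD i none) else some "") := by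
  have hfun : (fun (acc : List (Option String)) i =>
      if i < row.length then acc ++ [pvCleanCell (row.getD i none)] else acc ++ [some ""])
    = (fun (acc : List (Option String)) i =>
      acc ++ [if i < row.length then pvCleanCell (row.getD i none) else some ""]) := by
    funext acc i; split <;> rfl
  rw [hfun, pv_foldl_append_map]
  simp

-- peeling a uniformly-cons list of columns succeeds and splits heads/tails
theorem pvPeel_map_cons {α β : Type} (l : List α) (a : α → β) (b : α → List β) :
    pvPeel (l.map (fun j => a j :: b j)) = some (l.map a, l.map b) := by
  induction l with
  | nil => simp [pvPeel]
  | cons h t ih => simp [pvPeel, ih]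

-- the transpose lemma: zipping the column-major build gives the row-major build
theorem pv_zip_map {α β : Type} (g : Nat → List α → β) (n : Nat) (hn : 1 ≤ n)
    (rows : List (List α)) :
    pvZipStar ((List.range n).map (fun j => rows.map (g j)))
      = rows.map (fun row => (List.range n).map (fun j => g j row)) := by
  induction rows with
  | nil =>
    obtain ⟨m, rfl⟩ : ∃ m, n = m + 1 := ⟨n - 1, by omega⟩
    have hpn : pvPeel (List.map (fun j => List.map (g j) ([] : List (List α))) (List.range (m + 1))) = none := by
      rw [List.range_succ_eq_map]; simp [pvPeel]
    rw [pvZipStar]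
    rw [dif_neg (by simp [List.range_succ_eq_map])]
    split
    · rfl
    · next hs ts hp => rw [hpn] at hp; cases hp
  | cons row rest ih =>
    have hcols : (List.range n).map (fun j => (row :: rest).map (g j))
        = (List.range n).map (fun j => g j row :: rest.map (g j)) := by simp
    rw [hcols, pvZipStar]
    rw [dif_neg (by simp; omega)]
    rw [pvPeel_map_cons]
    simp only []
    rw [ih]
    simp

-- ===== VERDICT (by name: the statement is the Claim_ definition above) =====
theorem clean_pdfplumber_table_py_spec : Claim_equal_clean_pdfplumber_table_py := by
  intro td _ hpre
  unfold Spec_clean_pdfplumber_table_py clean_pdfplumber_table_py clean_pdfplumber_table_py_alt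
  by_cases htd : td = []
  · simp [htd]
  · simp only [htd, ite_false]
    set lens := ((td.filter (fun r => !r.isEmpty)).map (fun r => r.length)) with hlens
    set maxCols := ((PySem.List.max? lens (fun x => x)).getD 0) with hmc
    -- Pre_ gives a nonempty row, hence maxCols ≥ 1
    obtain ⟨r0, hr0mem, hr0ne⟩ : ∃ r ∈ td, r ≠ [] := hpre.resolve_left htd
    have hone : 1 ≤ maxCols := by
      have hmem : r0.length ∈ lens := by
        rw [hlens]
        exact List.mem_map_of_mem (List.mem_filter.2 ⟨hr0mem, by simpa using hr0ne⟩)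
      have hnonnil : lens ≠ [] := fun h => by simp [h] at hmem
      obtain ⟨m, hm⟩ : ∃ m, PySem.List.max? lens (fun x => x) = some m := by
        cases hmax : PySem.List.max? lens (fun x => x) with
        | none => exact absurd ((PySem.List.max?_eq_none_iff _ _).1 hmax) hnonnil
        | some m => exact ⟨m, rfl⟩
      have hle := PySem.List.max?_isMax hm r0.length hmem
      have : 1 ≤ r0.length := List.length_pos_iff.2 hr0ne
      simp only [hmc, hm, Option.getD_some]
      omega
    -- A's side: foldl-append is a map, each row is a map over range
    rw [pv_foldl_append_map]
    simp only [List.nil_append]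
    rw [pv_zip_map (fun i row => if i < row.length then pvCleanCell (row.getD i none) else some "") maxCols hone td]
    apply List.map_congr_left
    intro row hrow
    by_cases hre : row = []
    · subst hre
      simp
    · simp only [hre, ite_false]
      exact pv_row_foldl_eq_map row maxCols
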